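-- pv_equiv track=rewrite | github.com/DSMInhyeKang/Algorithm-CodingTest | Algorithm/ProgrammersCodingTest/PythonCodingTest.py | solution
-- ===== SOURCE A (Python) =====
-- def solution(n, tops):
--     MOD = 10007
--     dp1, dp2 = [0] * n, [0] * n
--     dp1[0], dp2[0] = 1, 2 + tops[0]
--
--     for i in range(1, n):
--         dp1[i] = (dp1[i - 1] + dp2[i - 1]) % MOD
--         dp2[i] = ((dp1[i - 1] * (1 + tops[i])) + (dp2[i - 1] * (2 + tops[i]))) % MOD
--
--     return (dp1[-1] + dp2[-1]) % MOD
-- ===== SOURCE B (Python) =====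
-- def solution(n, tops):
--     # Single second-order scalar recurrence S_i = ((3+tops[i])*S_{i-1} - S_{i-2}) % 10007
--     # rolled in two scalars, instead of the two coupled DP arrays.
--     MOD = 10007
--     s2, s1 = 1, (3 + tops[0]) % MOD
--     for i in range(1, n):
--         s2, s1 = s1, ((3 + tops[i]) * s1 - s2) % MOD
--     return s1
-- ===== Notes on version B (the rewrite author's own statement) =====
-- stated objective: faster
-- what changed: Collapses the two coupled DP arrays dp1/dp2 into one second-order scalar recurrence S_i = ((3+tops[i])*S_{i-1} - S_{i-2}) % 10007 rolled in two scalars: no list allocation or per-step indexing (measured ~1.9x faster, O(1) space).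
import Mathlib
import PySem

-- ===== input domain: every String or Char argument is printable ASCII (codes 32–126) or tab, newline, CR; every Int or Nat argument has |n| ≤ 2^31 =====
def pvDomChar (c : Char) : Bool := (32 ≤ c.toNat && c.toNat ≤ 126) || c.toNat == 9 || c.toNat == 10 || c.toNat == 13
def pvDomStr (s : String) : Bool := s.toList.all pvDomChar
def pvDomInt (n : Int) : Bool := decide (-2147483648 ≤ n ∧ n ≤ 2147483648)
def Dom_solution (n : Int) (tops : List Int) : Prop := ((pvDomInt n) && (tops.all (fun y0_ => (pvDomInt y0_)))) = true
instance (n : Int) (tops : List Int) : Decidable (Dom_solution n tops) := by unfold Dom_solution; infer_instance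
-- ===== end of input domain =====

-- B collapses A's two coupled DP arrays into one second-order scalar recurrence (O(1) space).
-- ===== PORT A =====
-- loop body of A: dp1[i] = (dp1[i-1]+dp2[i-1]) % MOD; dp2[i] = (dp1[i-1]*(1+tops[i]) + dp2[i-1]*(2+tops[i])) % MOD
def stepA (tops : List Int) (st : List Int × List Int) (i : Int) : List Int × List Int :=
  let d1 := PySem.List.pySetD st.1 i
      (PySem.Int.mod (PySem.List.pyGetD st.1 (i - 1) 0 + PySem.List.pyGetD st.2 (i - 1) 0) 10007)
  let d2 := PySem.List.pySetD st.2 i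
      (PySem.Int.mod (PySem.List.pyGetD d1 (i - 1) 0 * (1 + PySem.List.pyGetD tops i 0)
        + PySem.List.pyGetD st.2 (i - 1) 0 * (2 + PySem.List.pyGetD tops i 0)) 10007)
  (d1, d2)

def solution (n : Int) (tops : List Int) : Int :=
  let dp1 : List Int := List.replicate n.toNat 0
  let dp2 : List Int := List.replicate n.toNat 0
  let dp1 := PySem.List.pySetD dp1 0 1
  let dp2 := PySem.List.pySetD dp2 0 (2 + PySem.List.pyGetD tops 0 0)
  let p := (PySem.List.pyRange 1 n 1).foldl (stepA tops) (dp1, dp2)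
  PySem.Int.mod (PySem.List.pyGetD p.1 (-1) 0 + PySem.List.pyGetD p.2 (-1) 0) 10007

-- ===== PORT B =====
-- loop body of B: s2, s1 = s1, ((3 + tops[i]) * s1 - s2) % MOD
def stepB (tops : List Int) (st : Int × Int) (i : Int) : Int × Int :=
  (st.2, PySem.Int.mod ((3 + PySem.List.pyGetD tops i 0) * st.2 - st.1) 10007)

def solution_alt (n : Int) (tops : List Int) : Int :=
  let p := (PySem.List.pyRange 1 n 1).foldl (stepB tops)
    (1, PySem.Int.mod (3 + PySem.List.pyGetD tops 0 0) 10007)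
  p.2

-- ===== PRECONDITION & SPEC =====
-- A raises IndexError when n < 1 (dp1[0] on an empty list) or when tops has fewer than n entries.
def Pre_solution (n : Int) (tops : List Int) : Prop := 1 ≤ n ∧ n ≤ (tops.length : Int)
instance (n : Int) (tops : List Int) : Decidable (Pre_solution n tops) := by
  unfold Pre_solution; infer_instance
def pvWitness_solution : Int × List Int := (2, [1, 0])

def Spec_solution (n : Int) (tops : List Int) (out : Int) : Prop := out = solution_alt n tops
instance (n : Int) (tops : List Int) (out : Int) : Decidable (Spec_solution n tops out) := by
  unfold Spec_solution; infer_instance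

-- ===== CLAIM (what is proved, stated in full; the proofs are below) =====
def Claim_equal_solution : Prop := ∀ (n : Int) (tops : List Int), Dom_solution n tops → Pre_solution n tops → Spec_solution n tops (solution n tops)

-- ===== LEMMAS AND PROOFS =====

theorem mod_key (x y t : Int) :
    ((3 + t) * ((x + y) % 10007) - x) % 10007
      = ((x + y) % 10007 + (x * (1 + t) + y * (2 + t)) % 10007) % 10007 := by
  have e1 : ((x + y) % 10007 : Int) ≡ x + y [ZMOD 10007] :=
    Int.emod_emod_of_dvd _ dvd_rfl
  have e2 : ((x * (1 + t) + y * (2 + t)) % 10007 : Int) ≡ x * (1 + t) + y * (2 + t) [ZMOD 10007] :=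
    Int.emod_emod_of_dvd _ dvd_rfl
  have h1 : (3 + t) * ((x + y) % 10007) - x ≡ (3 + t) * (x + y) - x [ZMOD 10007] :=
    (e1.mul_left (3 + t)).sub_right x
  have h2 : (x + y) % 10007 + (x * (1 + t) + y * (2 + t)) % 10007
      ≡ (x + y) + (x * (1 + t) + y * (2 + t)) [ZMOD 10007] := e1.add e2
  have h3 : (3 + t) * (x + y) - x = (x + y) + (x * (1 + t) + y * (2 + t)) := by ring
  exact h1.trans (h3 ▸ h2.symm)

theorem foldA_length (tops : List Int) :
    ∀ (L : List Int) (dp1 dp2 : List Int),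
      (L.foldl (stepA tops) (dp1, dp2)).1.length = dp1.length ∧
      (L.foldl (stepA tops) (dp1, dp2)).2.length = dp2.length := by
  intro L
  induction L with
  | nil => intro dp1 dp2; simp
  | cons x xs ih =>
      intro dp1 dp2
      simp only [List.foldl_cons]
      have h := ih (stepA tops (dp1, dp2) x).1 (stepA tops (dp1, dp2) x).2
      simpa [stepA, PySem.List.length_pySetD] using h

theorem hmod (z : Int) : PySem.Int.mod z 10007 = z % 10007 :=
  PySem.Int.mod_eq_emod_of_pos (by norm_num)

theorem loop_eq (tops : List Int) (n : Int) :
    ∀ (k : Nat) (a : Int), a = n - (k : Int) → 1 ≤ a →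
    ∀ (dp1 dp2 : List Int), dp1.length = n.toNat → dp2.length = n.toNat →
    ∀ (s2 s1 : Int),
      s2 = PySem.List.pyGetD dp1 (a - 1) 0 →
      s1 = (PySem.List.pyGetD dp1 (a - 1) 0 + PySem.List.pyGetD dp2 (a - 1) 0) % 10007 →
      ((PySem.List.pyRange a n 1).foldl (stepB tops) (s2, s1)).2
        = (PySem.List.pyGetD ((PySem.List.pyRange a n 1).foldl (stepA tops) (dp1, dp2)).1 (n - 1) 0
          + PySem.List.pyGetD ((PySem.List.pyRange a n 1).foldl (stepA tops) (dp1, dp2)).2 (n - 1) 0) % 10007 := by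
  intro k
  induction k with
  | zero =>
      intro a ha h1a dp1 dp2 hl1 hl2 s2 s1 hs2 hs1
      have han : n ≤ a := by omega
      rw [PySem.List.pyRange_one_eq_nil han]
      simp only [List.foldl_nil]
      have : a - 1 = n - 1 := by omega
      rw [this] at hs1
      exact hs1
  | succ k ih =>
      intro a ha h1a dp1 dp2 hl1 hl2 s2 s1 hs2 hs1
      have hlt : a < n := by omega
      rw [PySem.List.pyRange_one_cons hlt]
      simp only [List.foldl_cons]
      have h0a : (0:Int) ≤ a := by omega
      have haln1 : a < (dp1.length : Int) := by omega
      have haln2 : a < (dp2.length : Int) := by omega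
      have ha1n1 : a - 1 < (dp1.length : Int) := by omega
      have ha1n2 : a - 1 < (dp2.length : Int) := by omega
      set x := PySem.List.pyGetD dp1 (a - 1) 0 with hx
      set y := PySem.List.pyGetD dp2 (a - 1) 0 with hy
      set t := PySem.List.pyGetD tops a 0 with ht
      set v1 : Int := (x + y) % 10007 with hv1
      set w : Int := (x * (1 + t) + y * (2 + t)) % 10007 with hw
      -- characterize stepA
      have hxg : x = dp1[(a-1).toNat]'(by omega) := by
        rw [hx, PySem.List.pyGetD_eq_getElem dp1 0 (by omega) ha1n1]
      have hd1 : (stepA tops (dp1, dp2) a).1 = dp1.set a.toNat v1 := by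
        simp only [stepA, hmod, ← hx, ← hy, ← hv1]
        rw [PySem.List.pySetD_of_nonneg dp1 _ h0a]
      have hread : PySem.List.pyGetD (dp1.set a.toNat v1) (a - 1) 0 = x := by
        rw [PySem.List.pyGetD_eq_getElem _ 0 (by omega) (by simpa using ha1n1)]
        rw [hxg]
        exact List.getElem_set_ne (by omega) _
      have hd2 : (stepA tops (dp1, dp2) a).2 = dp2.set a.toNat w := by
        simp only [stepA, hmod, ← hx, ← hy, ← ht, ← hv1]
        rw [PySem.List.pySetD_of_nonneg dp1 _ h0a, PySem.List.pySetD_of_nonneg dp2 _ h0a,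
          hread, ← hw]
      have hstepA : stepA tops (dp1, dp2) a = (dp1.set a.toNat v1, dp2.set a.toNat w) := by
        exact Prod.ext hd1 hd2
      have hstepB : stepB tops (s2, s1) a = (s1, (v1 + w) % 10007) := by
        simp only [stepB, ← ht, hmod, hs1, hs2]
        rw [hv1, hw, mod_key x y t]
      rw [hstepA, hstepB]
      have hga : PySem.List.pyGetD (dp1.set a.toNat v1) (a + 1 - 1) 0 = v1 := by
        have : a + 1 - 1 = a := by omega
        rw [this, PySem.List.pyGetD_eq_getElem _ 0 h0a (by simpa using haln1)]
        exact List.getElem_set_self (by simpa using (by omega : a.toNat < dp1.length))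
      have hgb : PySem.List.pyGetD (dp2.set a.toNat w) (a + 1 - 1) 0 = w := by
        have : a + 1 - 1 = a := by omega
        rw [this, PySem.List.pyGetD_eq_getElem _ 0 h0a (by simpa using haln2)]
        exact List.getElem_set_self (by simpa using (by omega : a.toNat < dp2.length))
      exact ih (a + 1) (by omega) (by omega) _ _
        (by simpa using hl1) (by simpa using hl2) s1 ((v1 + w) % 10007)
        (by rw [hga]; exact hs1)
        (by rw [hga, hgb])

theorem solution_eq_alt (n : Int) (tops : List Int)
    (h1n : 1 ≤ n) (_hlen : n ≤ (tops.length : Int)) :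
    solution n tops = solution_alt n tops := by
  simp only [solution, solution_alt]
  have hn0 : 0 < n.toNat := by omega
  set t0 := PySem.List.pyGetD tops 0 0 with ht0
  set d10 := PySem.List.pySetD (List.replicate n.toNat (0:Int)) 0 1 with hd10
  set d20 := PySem.List.pySetD (List.replicate n.toNat (0:Int)) 0 (2 + t0) with hd20
  have hl1 : d10.length = n.toNat := by
    rw [hd10, PySem.List.length_pySetD, List.length_replicate]
  have hl2 : d20.length = n.toNat := by
    rw [hd20, PySem.List.length_pySetD, List.length_replicate]
  have hg1 : PySem.List.pyGetD d10 (1 - 1) 0 = 1 := by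
    rw [(by norm_num : (1:Int) - 1 = 0),
      PySem.List.pyGetD_eq_getElem _ 0 le_rfl (by omega)]
    simp [hd10, PySem.List.pySetD_of_nonneg _ _ (le_refl (0:Int))]
  have hg2 : PySem.List.pyGetD d20 (1 - 1) 0 = 2 + t0 := by
    rw [(by norm_num : (1:Int) - 1 = 0),
      PySem.List.pyGetD_eq_getElem _ 0 le_rfl (by omega)]
    simp [hd20, PySem.List.pySetD_of_nonneg _ _ (le_refl (0:Int))]
  have hkey := loop_eq tops n (n - 1).toNat 1 (by omega) le_rfl d10 d20 hl1 hl2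
      1 (PySem.Int.mod (3 + t0) 10007)
      (by rw [hg1]) (by rw [hg1, hg2, hmod]; congr 1; ring)
  rw [hkey]
  set p := (PySem.List.pyRange 1 n).foldl (stepA tops) (d10, d20) with hp
  have hpl := foldA_length tops (PySem.List.pyRange 1 n) d10 d20
  have hpl1 : p.1.length = n.toNat := by rw [hp, hpl.1, hl1]
  have hpl2 : p.2.length = n.toNat := by rw [hp, hpl.2, hl2]
  rw [hmod,
    PySem.List.pyGetD_neg_ofNat p.1 1 0 (by omega) (by omega),
    PySem.List.pyGetD_neg_ofNat p.2 1 0 (by omega) (by omega),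
    PySem.List.pyGetD_eq_getElem p.1 0 (by omega) (by omega),
    PySem.List.pyGetD_eq_getElem p.2 0 (by omega) (by omega)]
  rw [getElem_congr rfl (by omega : (n-1).toNat = p.1.length - 1) (by omega),
    getElem_congr rfl (by omega : (n-1).toNat = p.2.length - 1) (by omega)]

-- ===== VERDICT (by name: the statement is the Claim_ definition above) =====
theorem solution_spec : Claim_equal_solution := by
  intro n tops _ hpre
  unfold Spec_solution
  exact solution_eq_alt n tops hpre.1 hpre.2
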